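-- pv_equiv track=rewrite | github.com/satyamunje/resume_relevance_check_system | core/parsers.py | _extract_education_requirement
-- ===== SOURCE A (Python) =====
-- from typing import List
--
-- def _extract_education_requirement(text: str) -> List[str]:
--     education_keywords = [
--         'bachelor', 'master', 'phd', 'b.tech', 'm.tech', 'b.e.', 'm.e.',
--         'bsc', 'msc', 'mba', 'degree'
--     ]
--     requirements = []
--     for keyword in education_keywords:
--         if keyword in text.lower():
--             for sentence in text.split('.'):
--                 if keyword in sentence.lower():
--                     requirements.append(sentence.strip())
--                     break
--     return requirements[:3]
-- ===== SOURCE B (Python) =====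
-- from typing import List
--
-- def _extract_education_requirement(text: str) -> List[str]:
--     education_keywords = [
--         'bachelor', 'master', 'phd', 'b.tech', 'm.tech', 'b.e.', 'm.e.',
--         'bsc', 'msc', 'mba', 'degree'
--     ]
--     low = text.lower()
--     active = [kw for kw in education_keywords if kw in low]
--     found = {}
--     for sentence in text.split('.'):
--         sl = sentence.lower()
--         for kw in active:
--             if kw not in found and kw in sl:
--                 found[kw] = sentence.strip()
--     return [found[kw] for kw in active if kw in found][:3]
-- ===== Notes on version B (the rewrite author's own statement) =====
-- stated objective: alternative
-- what changed: Inverted the loop nesting: instead of rescanning the sentence list once per keyword, B makes a single pass over the sentences maintaining a keyword-to-first-matching-sentence dictionary (keywords prefiltered once against the lowered text), then emits the stored sentences in keyword order.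
import Mathlib
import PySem

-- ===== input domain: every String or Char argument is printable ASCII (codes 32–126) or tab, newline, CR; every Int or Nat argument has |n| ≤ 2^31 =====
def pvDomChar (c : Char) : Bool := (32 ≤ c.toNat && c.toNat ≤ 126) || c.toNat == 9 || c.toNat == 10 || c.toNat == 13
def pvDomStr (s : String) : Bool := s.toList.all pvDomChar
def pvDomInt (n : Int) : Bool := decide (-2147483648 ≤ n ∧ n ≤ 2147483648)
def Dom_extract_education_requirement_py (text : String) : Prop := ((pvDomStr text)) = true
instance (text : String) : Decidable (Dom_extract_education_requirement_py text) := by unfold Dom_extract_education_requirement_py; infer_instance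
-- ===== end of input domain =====

-- B inverts the loop nesting: one pass over the sentences maintaining a keyword -> first-matching-sentence
-- dictionary, instead of rescanning the sentence list once per keyword (objective: alternative decomposition).


-- the literal keyword list both Pythons carry
def pvKeywords : List String :=
  ["bachelor", "master", "phd", "b.tech", "m.tech", "b.e.", "m.e.", "bsc", "msc", "mba", "degree"]

-- ===== PORT A =====
-- A's inner loop: "for sentence in text.split('.'): if keyword in sentence.lower(): append(strip); break"
def pvAInner (kw : String) (sents : List String) (acc : List String) : List String :=
  match sents with
  | [] => acc
  | s :: rest =>
      if PySem.Str.isIn kw (PySem.Str.lower s) then acc ++ [PySem.Str.strip s]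
      else pvAInner kw rest acc

def extract_education_requirement_py (text : String) : List String :=
  let sents := (PySem.Str.split? text ".").getD []
  (pvKeywords.foldl
      (fun acc kw => if PySem.Str.isIn kw (PySem.Str.lower text) then pvAInner kw sents acc else acc)
      []).take 3

-- ===== PORT B =====
def extract_education_requirement_py_alt (text : String) : List String :=
  let low := PySem.Str.lower text
  let active := pvKeywords.filter (fun kw => PySem.Str.isIn kw low)
  let found : PySem.Dict String String :=
    ((PySem.Str.split? text ".").getD []).foldl
      (fun d s =>
        let sl := PySem.Str.lower s
        active.foldl
          (fun d kw =>
            if (!d.contains kw) && PySem.Str.isIn kw sl then d.insert kw (PySem.Str.strip s) else d)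
          d)
      PySem.Dict.empty
  ((active.filter (fun kw => found.contains kw)).map (fun kw => (found.get? kw).getD "")).take 3

-- ===== PRECONDITION & SPEC =====
def Spec_extract_education_requirement_py (text : String) (out : List String) : Prop := out = extract_education_requirement_py_alt text
instance (text : String) (out : List String) : Decidable (Spec_extract_education_requirement_py text out) := by unfold Spec_extract_education_requirement_py; infer_instance

-- ===== CLAIM (what is proved, stated in full; the proofs are below) =====
def Claim_equal_extract_education_requirement_py : Prop := ∀ (text : String), Dom_extract_education_requirement_py text → Spec_extract_education_requirement_py text (extract_education_requirement_py text)

-- ===== LEMMAS AND PROOFS =====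

-- the stripped first sentence whose lowercase contains kw, if any
def pvF (sents : List String) (kw : String) : Option String :=
  (sents.find? (fun s => PySem.Chars.isIn kw.toList (PySem.Chars.lower s.toList))).map PySem.Str.strip

-- B's inner keyword loop: the dict entry of k after processing one sentence
theorem pv_inner_get (s : String) (active : List String) (hnd : active.Nodup)
    (d : PySem.Dict String String) (k : String) :
    ((active.foldl
        (fun d kw =>
          if (!d.contains kw) && PySem.Str.isIn kw (PySem.Str.lower s) then d.insert kw (PySem.Str.strip s) else d)
        d).get? k)
      = if k ∈ active ∧ d.contains k = false ∧ PySem.Chars.isIn k.toList (PySem.Chars.lower s.toList) = true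
        then some (PySem.Str.strip s) else d.get? k := by
  induction active generalizing d with
  | nil => simp
  | cons a t ih =>
    rcases List.nodup_cons.mp hnd with ⟨hat, hndt⟩
    rw [List.foldl_cons]
    by_cases hstep : ((!d.contains a) && PySem.Str.isIn a (PySem.Str.lower s)) = true
    · have hcf : d.contains a = false := by
        cases h : d.contains a
        · rfl
        · rw [h] at hstep; simp at hstep
      have hin : PySem.Chars.isIn a.toList (PySem.Chars.lower s.toList) = true := by
        simpa [hcf] using hstep
      have hfda : (if ((!d.contains a) && PySem.Str.isIn a (PySem.Str.lower s)) = true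
          then d.insert a (PySem.Str.strip s) else d) = d.insert a (PySem.Str.strip s) := if_pos hstep
      rw [hfda, ih hndt]
      by_cases hak : a = k
      · subst hak
        have h1 : (d.insert a (PySem.Str.strip s)).contains a = true := PySem.Dict.contains_insert_self d a _
        have h2 : (d.insert a (PySem.Str.strip s)).get? a = some (PySem.Str.strip s) := PySem.Dict.get?_insert_self d a _
        simp [hat, h1, h2, hcf, hin]
      · have hka : k ≠ a := Ne.symm hak
        have h1 : (d.insert a (PySem.Str.strip s)).contains k = d.contains k := by
          rw [PySem.Dict.contains_insert]; simp [hka]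
        have h2 : (d.insert a (PySem.Str.strip s)).get? k = d.get? k :=
          PySem.Dict.get?_insert_of_ne d _ hka
        simp [h1, h2, hka]
    · have hfda : (if ((!d.contains a) && PySem.Str.isIn a (PySem.Str.lower s)) = true
          then d.insert a (PySem.Str.strip s) else d) = d := if_neg hstep
      rw [hfda, ih hndt]
      by_cases hak : a = k
      · subst hak
        by_cases hc : d.contains a = true
        · simp [hat, hc]
        · have hcf : d.contains a = false := by
            cases h : d.contains a
            · rfl
            · exact absurd h hc
          have hin : ¬ (PySem.Chars.isIn a.toList (PySem.Chars.lower s.toList) = true) := by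
            intro hin; exact hstep (by simp [hcf, hin])
          simp [hat, hin]
      · simp [Ne.symm hak]

-- B's outer sentence loop: the dict entry of k after all sentences is its first match
theorem pv_outer_get (sents : List String) (active : List String) (hnd : active.Nodup)
    (d : PySem.Dict String String) (k : String) (hk : k ∈ active) :
    ((sents.foldl
        (fun d s =>
          active.foldl
            (fun d kw =>
              if (!d.contains kw) && PySem.Str.isIn kw (PySem.Str.lower s) then d.insert kw (PySem.Str.strip s) else d)
            d)
        d).get? k)
      = if d.contains k = true then d.get? k else pvF sents k := by
  induction sents generalizing d with
  | nil =>
    rw [List.foldl_nil]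
    by_cases hc : d.contains k = true
    · rw [if_pos hc]
    · have : d.get? k = none := by
        rw [PySem.Dict.get?_eq_none_iff_contains]
        cases h : d.contains k
        · rfl
        · exact absurd h hc
      simp [hc, this, pvF]
  | cons s rest ih =>
    rw [List.foldl_cons, ih]
    have hget1 := pv_inner_get s active hnd d k
    by_cases hc : d.contains k = true
    · have h1 : (active.foldl
          (fun d kw =>
            if (!d.contains kw) && PySem.Str.isIn kw (PySem.Str.lower s) then d.insert kw (PySem.Str.strip s) else d)
          d).get? k = d.get? k := by rw [hget1]; simp [hc]
      have hc1 : (active.foldl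
          (fun d kw =>
            if (!d.contains kw) && PySem.Str.isIn kw (PySem.Str.lower s) then d.insert kw (PySem.Str.strip s) else d)
          d).contains k = true := by
        rw [PySem.Dict.contains_eq_isSome_get?, h1, ← PySem.Dict.contains_eq_isSome_get?, hc]
      rw [if_pos hc1, if_pos hc, h1]
    · have hcf : d.contains k = false := by
        cases h : d.contains k
        · rfl
        · exact absurd h hc
      have hgn : d.get? k = none := by
        rw [PySem.Dict.get?_eq_none_iff_contains]; exact hcf
      by_cases hin : PySem.Chars.isIn k.toList (PySem.Chars.lower s.toList) = true
      · have h1 : (active.foldl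
            (fun d kw =>
              if (!d.contains kw) && PySem.Str.isIn kw (PySem.Str.lower s) then d.insert kw (PySem.Str.strip s) else d)
            d).get? k = some (PySem.Str.strip s) := by rw [hget1]; simp [hk, hcf, hin]
        have hc1 : (active.foldl
            (fun d kw =>
              if (!d.contains kw) && PySem.Str.isIn kw (PySem.Str.lower s) then d.insert kw (PySem.Str.strip s) else d)
            d).contains k = true := by
          rw [PySem.Dict.contains_eq_isSome_get?, h1]; rfl
        rw [if_pos hc1, if_neg hc, h1]
        simp [pvF, hin]
      · have h1 : (active.foldl
            (fun d kw =>
              if (!d.contains kw) && PySem.Str.isIn kw (PySem.Str.lower s) then d.insert kw (PySem.Str.strip s) else d)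
            d).get? k = none := by rw [hget1]; simp [hin, hgn]
        have hc1 : ¬ ((active.foldl
            (fun d kw =>
              if (!d.contains kw) && PySem.Str.isIn kw (PySem.Str.lower s) then d.insert kw (PySem.Str.strip s) else d)
            d).contains k = true) := by
          rw [PySem.Dict.contains_eq_isSome_get?, h1]; simp
        have hinf : PySem.Chars.isIn k.toList (PySem.Chars.lower s.toList) = false := by
          cases h : PySem.Chars.isIn k.toList (PySem.Chars.lower s.toList)
          · rfl
          · exact absurd h hin
        rw [if_neg hc1, if_neg hc]
        simp [pvF, hinf]

-- A's inner loop appends the first matching sentence (stripped), if any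
theorem pv_aInner_eq (kw : String) (sents : List String) (acc : List String) :
    pvAInner kw sents acc = acc ++ (pvF sents kw).toList := by
  induction sents generalizing acc with
  | nil => simp [pvAInner, pvF]
  | cons s rest ih =>
    rw [pvAInner]
    by_cases h : PySem.Chars.isIn kw.toList (PySem.Chars.lower s.toList) = true
    · rw [if_pos (by simpa using h)]
      simp [pvF, h]
    · have h' : PySem.Chars.isIn kw.toList (PySem.Chars.lower s.toList) = false := by
        cases hh : PySem.Chars.isIn kw.toList (PySem.Chars.lower s.toList)
        · rfl
        · exact absurd hh h
      rw [if_neg (by simpa using h), ih]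
      simp [pvF, h']

-- A's keyword fold, as a filterMap over the keywords that occur in the lowered text
theorem pv_afold (sents : List String) (low : String) (L : List String) (acc : List String) :
    L.foldl (fun acc kw => if PySem.Str.isIn kw low then pvAInner kw sents acc else acc) acc
      = acc ++ (L.filter (fun kw => PySem.Str.isIn kw low)).filterMap (pvF sents) := by
  induction L generalizing acc with
  | nil => simp
  | cons a t ih =>
    rw [List.foldl_cons]
    by_cases h : PySem.Chars.isIn a.toList low.toList = true
    · rw [if_pos (by simpa using h), pv_aInner_eq, ih,
          List.filter_cons_of_pos (by simpa using h), List.filterMap_cons]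
      cases hf : pvF sents a <;> simp [List.append_assoc]
    · rw [if_neg (by simpa using h), ih, List.filter_cons_of_neg (by simpa using h)]

-- B's final comprehension: filter-by-contains + lookup = filterMap of get?
theorem pv_filter_map_get (found : PySem.Dict String String) (L : List String) :
    (L.filter (fun kw => found.contains kw)).map (fun kw => (found.get? kw).getD "")
      = L.filterMap (fun kw => found.get? kw) := by
  induction L with
  | nil => simp
  | cons a t ih =>
    rw [List.filterMap_cons]
    cases h : found.get? a with
    | none =>
        have hc : found.contains a = false := by
          rw [PySem.Dict.contains_eq_isSome_get?, h]; rfl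
        rw [List.filter_cons_of_neg (by simp [hc]), ih]
    | some v =>
        have hc : found.contains a = true := by
          rw [PySem.Dict.contains_eq_isSome_get?, h]; rfl
        rw [List.filter_cons_of_pos hc, List.map_cons, ih, h]
        simp

-- ===== VERDICT (by name: the statement is the Claim_ definition above) =====
theorem extract_education_requirement_py_spec : Claim_equal_extract_education_requirement_py := by
  intro text _
  unfold Spec_extract_education_requirement_py
  unfold extract_education_requirement_py extract_education_requirement_py_alt
  dsimp only
  have hnd : (pvKeywords.filter (fun kw => PySem.Str.isIn kw (PySem.Str.lower text))).Nodup := by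
    apply List.Nodup.filter
    decide
  set sents := (PySem.Str.split? text ".").getD [] with hsents
  set active := pvKeywords.filter (fun kw => PySem.Str.isIn kw (PySem.Str.lower text)) with hactive
  set found : PySem.Dict String String :=
    sents.foldl
      (fun d s =>
        active.foldl
          (fun d kw =>
            if (!d.contains kw) && PySem.Str.isIn kw (PySem.Str.lower s) then d.insert kw (PySem.Str.strip s) else d)
          d)
      PySem.Dict.empty with hfound
  have hget : ∀ k ∈ active, found.get? k = pvF sents k := by
    intro k hk
    rw [hfound, pv_outer_get sents active hnd PySem.Dict.empty k hk]
    simp [PySem.Dict.contains_empty]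
  rw [pv_afold sents (PySem.Str.lower text) pvKeywords [], pv_filter_map_get found active,
      List.filterMap_congr hget]
  simp [hactive]
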